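-- pv_equiv track=rewrite | github.com/Killzy512/Kami-bot | cogs/kami_adventure.py | _find_shop_item_by_name
-- ===== SOURCE A (Python) =====
-- from typing import Any, Dict, List, Optional, Tuple
--
-- def _find_shop_item_by_name(catalog: List[Dict[str, Any]], name: str) -> Optional[Dict[str, Any]]:
--     q = name.strip().lower()
--     for it in catalog:
--         if it.get("name", "").lower() == q:
--             return it
--     for it in catalog:
--         if it.get("name", "").lower().startswith(q):
--             return it
--     return None
-- ===== SOURCE B (Python) =====
-- from typing import Any, Dict, List, Optional
--
-- def _find_shop_item_by_name(catalog: List[Dict[str, Any]], name: str) -> Optional[Dict[str, Any]]: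
--     q = name.strip().lower()
--     prefix_match = None
--     for it in catalog:
--         nm = it.get("name", "").lower()
--         if nm == q:
--             return it
--         if prefix_match is None and nm.startswith(q):
--             prefix_match = it
--     return prefix_match
-- ===== Notes on version B (the rewrite author's own statement) =====
-- stated objective: alternative
-- what changed: Replaced A's two full scans (exact pass, then prefix pass) by a single scan that returns immediately on an exact match while remembering the first prefix match in an accumulator.
import Mathlib
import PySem

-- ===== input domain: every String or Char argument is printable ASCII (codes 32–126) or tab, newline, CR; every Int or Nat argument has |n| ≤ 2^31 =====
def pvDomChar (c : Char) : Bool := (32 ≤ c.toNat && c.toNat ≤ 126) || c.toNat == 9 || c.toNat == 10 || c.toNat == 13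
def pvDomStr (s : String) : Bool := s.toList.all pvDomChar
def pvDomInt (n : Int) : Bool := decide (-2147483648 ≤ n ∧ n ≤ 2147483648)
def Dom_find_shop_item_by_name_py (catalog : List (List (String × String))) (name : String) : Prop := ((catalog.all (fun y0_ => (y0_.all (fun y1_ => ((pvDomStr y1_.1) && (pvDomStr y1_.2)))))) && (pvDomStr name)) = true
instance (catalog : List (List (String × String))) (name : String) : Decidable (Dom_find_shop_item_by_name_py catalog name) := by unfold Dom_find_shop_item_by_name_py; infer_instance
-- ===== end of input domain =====

-- B does the same lookup in ONE scan (early return on exact match, first prefix match kept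
-- in an accumulator) instead of A's two full passes; alternative decomposition, same cost.

-- ===== PORT A =====
-- it.get("name", "").lower()
def fsLowerName (it : List (String × String)) : String :=
  PySem.Str.lower (PySem.Dict.getD (PySem.Dict.mk it) "name" "")

-- first loop of A: exact match
def fsExact (q : String) : List (List (String × String)) → Option (List (String × String))
  | [] => none
  | it :: rest => if fsLowerName it == q then some it else fsExact q rest

-- second loop of A: prefix match
def fsPrefix (q : String) : List (List (String × String)) → Option (List (String × String))
  | [] => none
  | it :: rest => if PySem.Str.startswith (fsLowerName it) q then some it else fsPrefix q rest

def find_shop_item_by_name_py (catalog : List (List (String × String))) (name : String) : Option (List (String × String)) :=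
  let q := PySem.Str.lower (PySem.Str.strip name)
  match fsExact q catalog with
  | some it => some it
  | none => fsPrefix q catalog

-- ===== PORT B =====
-- single pass: return on exact match, remember first prefix match
def fsScan (q : String) (acc : Option (List (String × String))) :
    List (List (String × String)) → Option (List (String × String))
  | [] => acc
  | it :: rest =>
    let nm := fsLowerName it
    if nm == q then some it
    else if acc.isNone && PySem.Str.startswith nm q then fsScan q (some it) rest
    else fsScan q acc rest

def find_shop_item_by_name_py_alt (catalog : List (List (String × String))) (name : String) : Option (List (String × String)) :=
  fsScan (PySem.Str.lower (PySem.Str.strip name)) none catalog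

-- ===== PRECONDITION & SPEC =====
def Spec_find_shop_item_by_name_py (catalog : List (List (String × String))) (name : String) (out : Option (List (String × String))) : Prop := out = find_shop_item_by_name_py_alt catalog name
instance (catalog : List (List (String × String))) (name : String) (out : Option (List (String × String))) : Decidable (Spec_find_shop_item_by_name_py catalog name out) := by unfold Spec_find_shop_item_by_name_py; infer_instance

-- ===== CLAIM (what is proved, stated in full; the proofs are below) =====
def Claim_equal_find_shop_item_by_name_py : Prop := ∀ (catalog : List (List (String × String))) (name : String), Dom_find_shop_item_by_name_py catalog name → Spec_find_shop_item_by_name_py catalog name (find_shop_item_by_name_py catalog name)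

-- ===== LEMMAS AND PROOFS =====
-- loop invariant of B's single pass vs A's two passes
theorem fsScan_eq (q : String) (cat : List (List (String × String))) :
    ∀ acc, fsScan q acc cat =
      match fsExact q cat with
      | some x => some x
      | none => match acc with
        | some p => some p
        | none => fsPrefix q cat := by
  induction cat with
  | nil => intro acc; cases acc <;> rfl
  | cons it rest ih =>
    intro acc
    by_cases hq : (fsLowerName it == q) = true
    · simp [fsScan, fsExact, hq]
    · cases acc with
      | some p =>
        simp [fsScan, fsExact, hq, ih]
      | none =>
        simp [fsScan, fsExact, fsPrefix, hq, ih]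
        split_ifs <;> rfl

-- ===== VERDICT (by name: the statement is the Claim_ definition above) =====
theorem find_shop_item_by_name_py_spec : Claim_equal_find_shop_item_by_name_py := by
  intro catalog name _
  unfold Spec_find_shop_item_by_name_py find_shop_item_by_name_py find_shop_item_by_name_py_alt
  rw [fsScan_eq]
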